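-- pv_equiv track=rewrite | github.com/Vectoras/codewars | 6. The observed PIN.py | get_possible_combos
-- ===== SOURCE A (Python) =====
-- def get_possible_combos(pin):
--
--     results = []
--     receivedResults = []
--     posibilities = {
--             '1' : ['1', '2', '4'],
--             '2' : ['1', '2', '3', '5'],
--             '3' : ['2', '3', '6'],
--             '4' : ['1', '4', '5', '7'],
--             '5' : ['2', '4', '5', '6', '8'],
--             '6' : ['3', '5', '6', '9'],
--             '7' : ['4', '7', '8'],
--             '8' : ['5', '7', '8', '9', '0'],
--             '9' : ['6', '8', '9'],
--             '0' : ['8', '0']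
--             }
--
--     # extract current PIN digit
--     digit = pin.pop(0);
--
--     # if at the end of initial PIN, meaning last digit -> all options are the ones in posibilities
--     if len(pin) == 0:
--         return posibilities[digit];
--
--     # if it passes the above test, meaning not at the end of pin ->
--
--     # get all combinations based on the rest of the digits without this one (eg: 369 -> 69)
--     receivedResults = get_possible_combos(pin.copy());
--
--     # go over all the possible digits
--     for p in posibilities[digit]:
--         # add current possible digit to all the possible combinations recevied from the next step
--         for r in receivedResults:
--             results.append (p + r);
--
--     return results;
-- ===== SOURCE B (Python) =====
-- def get_possible_combos(pin):
--     # Geometric approach: neighbours are computed from keypad coordinates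
--     # (3x4 grid, '0' below '8') instead of a hard-coded adjacency table.
--     def key_at(x, y):
--         if 0 <= x < 3 and 0 <= y < 3:
--             return str(3 * y + x + 1)
--         if (x, y) == (1, 3):
--             return '0'
--         return None
--
--     def neighbors(d):
--         n = int(d)
--         x, y = (1, 3) if n == 0 else ((n - 1) % 3, (n - 1) // 3)
--         out = []
--         for dx, dy in [(0, -1), (-1, 0), (0, 0), (1, 0), (0, 1)]:
--             k = key_at(x + dx, y + dy)
--             if k is not None:
--                 out.append(k)
--         return out
--
--     digit = pin.pop(0)
--     if not pin:
--         return neighbors(digit)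
--     combos = neighbors(digit)
--     for d in pin:
--         combos = [c + k for c in combos for k in neighbors(d)]
--     return combos
-- ===== Notes on version B (the rewrite author's own statement) =====
-- stated objective: alternative
-- what changed: Replaces A's hard-coded adjacency dict and recursion-with-list-copies by computing each digit's neighbours geometrically from keypad coordinates (3x4 grid arithmetic) and combining them with a single iterative left-fold cross product instead of recursion.
import Mathlib
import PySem

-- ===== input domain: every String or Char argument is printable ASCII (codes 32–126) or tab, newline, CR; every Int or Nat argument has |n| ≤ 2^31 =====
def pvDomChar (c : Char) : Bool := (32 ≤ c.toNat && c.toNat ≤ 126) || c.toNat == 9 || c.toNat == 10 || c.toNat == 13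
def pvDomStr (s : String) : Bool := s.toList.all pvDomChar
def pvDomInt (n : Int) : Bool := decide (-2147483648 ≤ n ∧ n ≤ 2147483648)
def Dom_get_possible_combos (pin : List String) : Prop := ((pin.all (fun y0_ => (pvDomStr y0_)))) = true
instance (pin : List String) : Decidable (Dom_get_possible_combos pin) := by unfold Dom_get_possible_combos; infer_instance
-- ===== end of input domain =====

-- B computes each digit's keypad neighbours geometrically (3x4 grid arithmetic) instead of A's
-- hard-coded adjacency dict, and combines them with one iterative left-fold instead of recursion.
-- Both A and B pop the first element of the caller's list in Python; the theorems are about the return value.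

-- ===== PORT A =====

-- A's `posibilities` dict, as a lookup function
def pvPosib (d : String) : List String :=
  if d = "1" then ["1", "2", "4"]
  else if d = "2" then ["1", "2", "3", "5"]
  else if d = "3" then ["2", "3", "6"]
  else if d = "4" then ["1", "4", "5", "7"]
  else if d = "5" then ["2", "4", "5", "6", "8"]
  else if d = "6" then ["3", "5", "6", "9"]
  else if d = "7" then ["4", "7", "8"]
  else if d = "8" then ["5", "7", "8", "9", "0"]
  else if d = "9" then ["6", "8", "9"]
  else if d = "0" then ["8", "0"]
  else []   -- KeyError in Python; excluded by Pre_

def get_possible_combos (pin : List String) : List String :=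
  match pin with
  | [] => []   -- Python raises IndexError here; excluded by Pre_
  | digit :: rest =>
    if rest = [] then pvPosib digit
    else
      -- receivedResults = get_possible_combos(pin.copy()); nested for-loops appending p + r
      let receivedResults := get_possible_combos rest
      (pvPosib digit).foldl
        (fun results p => receivedResults.foldl (fun results r => results ++ [p ++ r]) results) []

-- ===== PORT B =====

-- key_at(x, y): the digit at grid position (x, y), if any
def pvKeyAt (x y : Int) : Option String :=
  if 0 ≤ x ∧ x < 3 ∧ 0 ≤ y ∧ y < 3 then some (PySem.Int.toStr (3 * y + x + 1))
  else if x = 1 ∧ y = 3 then some "0"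
  else none

-- neighbors(d): up, left, self, right, down positions around d's coordinates
def pvNeighbors (d : String) : List String :=
  match PySem.Int.ofStr? d with
  | none => []   -- int(d) raises ValueError in Python; excluded by Pre_
  | some n =>
    let xy := if n = 0 then ((1 : Int), (3 : Int))
              else (PySem.Int.mod (n - 1) 3, PySem.Int.floordiv (n - 1) 3)
    [((0 : Int), (-1 : Int)), (-1, 0), (0, 0), (1, 0), (0, 1)].filterMap
      (fun p => pvKeyAt (xy.1 + p.1) (xy.2 + p.2))

def get_possible_combos_alt (pin : List String) : List String :=
  match pin with
  | [] => []   -- Python raises IndexError here; excluded by Pre_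
  | digit :: rest =>
    if rest = [] then pvNeighbors digit
    else
      rest.foldl
        (fun combos d => combos.flatMap (fun c => (pvNeighbors d).map (fun k => c ++ k)))
        (pvNeighbors digit)

-- ===== PRECONDITION & SPEC =====
-- Pre_ excludes exactly the inputs where the Python A raises: the empty list (IndexError from
-- pin.pop(0)) and lists containing a string that is not a single decimal digit (KeyError).
def Pre_get_possible_combos (pin : List String) : Prop :=
  pin ≠ [] ∧ ∀ s ∈ pin, s ∈ ["0", "1", "2", "3", "4", "5", "6", "7", "8", "9"]
instance (pin : List String) : Decidable (Pre_get_possible_combos pin) := by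
  unfold Pre_get_possible_combos; infer_instance

def pvWitness_get_possible_combos : List String := ["3", "6", "9"]

def Spec_get_possible_combos (pin : List String) (out : List String) : Prop := out = get_possible_combos_alt pin
instance (pin : List String) (out : List String) : Decidable (Spec_get_possible_combos pin out) := by unfold Spec_get_possible_combos; infer_instance

-- ===== CLAIM (what is proved, stated in full; the proofs are below) =====
def Claim_equal_get_possible_combos : Prop := ∀ (pin : List String), Dom_get_possible_combos pin → Pre_get_possible_combos pin → Spec_get_possible_combos pin (get_possible_combos pin)

-- ===== LEMMAS AND PROOFS =====

-- on digit strings, the geometric neighbour computation agrees with A's table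
theorem neighbors_eq_posib (d : String)
    (h : d ∈ ["0", "1", "2", "3", "4", "5", "6", "7", "8", "9"]) :
    pvNeighbors d = pvPosib d := by
  fin_cases h <;> decide

theorem flatten_map_single {a b : Type} (f : a → b) (l : List a) :
    (l.map (fun x => [f x])).flatten = l.map f := by
  induction l <;> simp_all

-- A's nested accumulation loops build exactly the flatMap of the cross product
theorem get_possible_combos_cons (d : String) (rest : List String) (h : rest ≠ []) :
    get_possible_combos (d :: rest) =
      (pvPosib d).flatMap (fun p => (get_possible_combos rest).map (fun r => p ++ r)) := by
  rw [get_possible_combos]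
  simp only [if_neg h]
  generalize get_possible_combos rest = R
  induction pvPosib d using List.reverseRecOn with
  | nil => simp
  | append_singleton ps p ih =>
    rw [List.foldl_append, List.flatMap_append, ← ih]
    simp only [List.foldl_cons, List.foldl_nil, List.flatMap_cons, List.flatMap_nil,
      List.append_nil]
    generalize (List.foldl _ [] ps : List String) = acc
    induction R generalizing acc with
    | nil => simp
    | cons r rs ihr => simp [List.append_assoc, flatten_map_single]

-- B's left fold (over digit strings), started from any accumulator, prefixes every
-- A-combination of the rest
theorem alt_foldl_eq (rest : List String) (h : rest ≠ [])
    (hd : ∀ s ∈ rest, s ∈ ["0", "1", "2", "3", "4", "5", "6", "7", "8", "9"])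
    (acc : List String) :
    rest.foldl (fun combos d => combos.flatMap (fun c => (pvNeighbors d).map (fun x => c ++ x))) acc
      = acc.flatMap (fun c => (get_possible_combos rest).map (fun r => c ++ r)) := by
  induction rest generalizing acc with
  | nil => exact absurd rfl h
  | cons d rest ih =>
    rw [List.foldl_cons, neighbors_eq_posib d (hd d (by simp))]
    by_cases hr : rest = []
    · subst hr
      simp [get_possible_combos]
    · rw [ih hr (fun s hs => hd s (by simp [hs])), get_possible_combos_cons d rest hr]
      simp [List.flatMap_assoc, List.flatMap_map, List.map_flatMap, List.map_map,
        Function.comp_def, String.append_assoc]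

-- ===== VERDICT (by name: the statement is the Claim_ definition above) =====
theorem get_possible_combos_spec : Claim_equal_get_possible_combos := by
  intro pin _ hpre
  unfold Spec_get_possible_combos
  match pin, hpre with
  | d :: rest, ⟨_, hdig⟩ =>
    by_cases hr : rest = []
    · subst hr
      rw [get_possible_combos, get_possible_combos_alt]
      simp [neighbors_eq_posib d (hdig d (by simp))]
    · rw [get_possible_combos_cons d rest hr, get_possible_combos_alt]
      simp only [if_neg hr]
      rw [alt_foldl_eq rest hr (fun s hs => hdig s (by simp [hs])),
        neighbors_eq_posib d (hdig d (by simp))]
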